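-- pv_equiv track=rewrite | github.com/structlearning/varscene | scene_gen/uncond_sggen/vg_data/process.py | __is_same_category
-- ===== SOURCE A (Python) =====
-- OBJ_DUP_CATEGORY = [
--     ('woman', 'guy', 'person', 'man', 'person', 'player', 'skier', 'lady', 'people', 'men'),
--     ('zebra', 'animal', 'bear', 'bird', 'cat', 'elephant', 'cow', 'giraffe', 'dog', 'sheep', 'horse'),
--     ('boy', 'girl', 'child', 'kid'),
--     ('truck', 'vehicle', 'train', 'motorcycle', 'bus', 'boat', 'bike', 'car'),
--     ('window', 'windshield'),
--     ('building', 'tower', 'house'),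
--     ('shoe', 'sneaker', 'boot'),
--     ('bench', 'chair', 'seat'),
--     ('tree', 'trunk'),
--     ('food', 'pizza'),
--     ('face', 'head', 'mouth'),
--     ('fruit', 'banana', 'orange'),
--     ('table', 'desk', 'counter', 'stand'),
--     ('cabinet', 'shelf', 'drawer'),
--     ('coat', 'jacket'),
--     ('street', 'track', 'sidewalk'),
--     ('airplane', 'plane'),
--     ('cap', 'hat', 'helmet'),
--     ('hill', 'mountain'),
--     ('pole', 'post'),
--     ('pot', 'vase'),
--     ('jean', 'pant', 'short'),
--     ('letter', 'logo', 'sign', 'number'),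
--     ('laptop', 'screen'),
--     ('light', 'lamp'),
--     ('beach', 'wave'),
--     ('tire', 'wheel'),
--     ('paw', 'hand'),
--     # following categories have no duplicates
--     #  ('shirt'), ('arm'), ('bag'), ('basket'), ('bed'), ('board'), ('book'), ('bottle'), ('bowl'),
--     #  ('box'), ('branch'), ('clock'), ('cup'), ('curtain'), ('door'), ('ear'), ('engine'), ('eye'), ('fence'),
--     #  ('finger'), ('flag'), ('flower'), ('fork'), ('glass'), ('glove'), ('hair'), ('handle'), ('kite'),
--     #  , ('leaf'), ('leg'), ('neck'), ('nose'), ('paper'), ('phone'), ('pillow'), ('plant'),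
--     #  ('plate'), ('racket'), ('railing'), ('rock'), ('roof'), ('room'), ('sink'), ('skateboard'), ('ski'), ('snow'),
--     #  ('sock'), ('surfboard'), ('tail'), ('tie'), ('tile'), ('toilet'), ('towel'), ('umbrella'),
--     #  ('vegetable'), ('wing'), ('wire')
-- ]
--
-- def __is_same_category(obj1, obj2):
--     member = None
--     for categ in OBJ_DUP_CATEGORY:
--         if obj1 in categ and obj2 in categ:
--             member = categ
--     if member is not None or obj1 == obj2:
--         return True
--     else:
--         return False
-- ===== SOURCE B (Python) =====
-- # Same category data, encoded compactly as one space-separated string per category,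
-- # indexed ONCE into a word -> category-index dict; each call is two O(1) lookups.
-- _CATEGORY_WORDS = [
--     "woman guy person man person player skier lady people men",
--     "zebra animal bear bird cat elephant cow giraffe dog sheep horse",
--     "boy girl child kid",
--     "truck vehicle train motorcycle bus boat bike car",
--     "window windshield",
--     "building tower house",
--     "shoe sneaker boot",
--     "bench chair seat",
--     "tree trunk",
--     "food pizza",
--     "face head mouth",
--     "fruit banana orange",
--     "table desk counter stand",
--     "cabinet shelf drawer",
--     "coat jacket",
--     "street track sidewalk",
--     "airplane plane",
--     "cap hat helmet",
--     "hill mountain",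
--     "pole post",
--     "pot vase",
--     "jean pant short",
--     "letter logo sign number",
--     "laptop screen",
--     "light lamp",
--     "beach wave",
--     "tire wheel",
--     "paw hand",
-- ]
--
-- _word2cat = {}
-- for _i, _s in enumerate(_CATEGORY_WORDS):
--     for _w in _s.split():
--         _word2cat[_w] = _i
--
-- def __is_same_category(obj1, obj2):
--     c1 = _word2cat.get(obj1)
--     return (c1 is not None and c1 == _word2cat.get(obj2)) or obj1 == obj2
-- ===== Notes on version B (the rewrite author's own statement) =====
-- stated objective: faster
-- what changed: B builds once a word-to-category-index dict (from the categories stored as space-separated strings) and answers each call with two O(1) lookups, instead of A's per-call scan over all 28 categories testing both labels against every tuple.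
import Mathlib
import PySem

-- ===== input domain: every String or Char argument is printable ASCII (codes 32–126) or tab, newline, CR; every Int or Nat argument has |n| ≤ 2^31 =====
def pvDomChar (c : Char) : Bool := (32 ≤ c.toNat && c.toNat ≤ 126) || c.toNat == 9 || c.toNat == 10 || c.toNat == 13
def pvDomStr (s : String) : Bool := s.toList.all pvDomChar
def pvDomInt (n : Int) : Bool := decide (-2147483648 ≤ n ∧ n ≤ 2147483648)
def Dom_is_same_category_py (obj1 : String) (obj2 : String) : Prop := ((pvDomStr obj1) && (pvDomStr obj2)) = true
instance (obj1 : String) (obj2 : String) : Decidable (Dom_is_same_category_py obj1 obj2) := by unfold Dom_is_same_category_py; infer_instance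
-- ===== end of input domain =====

-- B replaces A's per-call scan over all categories by a word→category-index dict, built once
-- from the categories stored as space-separated strings, answered by two lookups (faster per call).

-- ===== PORT A =====
-- A's module constant: Python tuples of labels, modelled as List String.
def OBJ_DUP_CATEGORY : List (List String) := [
  ["woman", "guy", "person", "man", "person", "player", "skier", "lady", "people", "men"],
  ["zebra", "animal", "bear", "bird", "cat", "elephant", "cow", "giraffe", "dog", "sheep", "horse"],
  ["boy", "girl", "child", "kid"],
  ["truck", "vehicle", "train", "motorcycle", "bus", "boat", "bike", "car"],
  ["window", "windshield"],
  ["building", "tower", "house"],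
  ["shoe", "sneaker", "boot"],
  ["bench", "chair", "seat"],
  ["tree", "trunk"],
  ["food", "pizza"],
  ["face", "head", "mouth"],
  ["fruit", "banana", "orange"],
  ["table", "desk", "counter", "stand"],
  ["cabinet", "shelf", "drawer"],
  ["coat", "jacket"],
  ["street", "track", "sidewalk"],
  ["airplane", "plane"],
  ["cap", "hat", "helmet"],
  ["hill", "mountain"],
  ["pole", "post"],
  ["pot", "vase"],
  ["jean", "pant", "short"],
  ["letter", "logo", "sign", "number"],
  ["laptop", "screen"],
  ["light", "lamp"],
  ["beach", "wave"],
  ["tire", "wheel"],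
  ["paw", "hand"]]

def is_same_category_py (obj1 : String) (obj2 : String) : Bool :=
  let member : Option (List String) :=
    OBJ_DUP_CATEGORY.foldl
      (fun member categ =>
        if categ.contains obj1 && categ.contains obj2 then some categ else member)
      none
  if member.isSome || (obj1 == obj2) then true else false

-- ===== PORT B =====
-- B's module constant: the same categories, one space-separated string per category.
def CATEGORY_WORDS : List String := [
  "woman guy person man person player skier lady people men",
  "zebra animal bear bird cat elephant cow giraffe dog sheep horse",
  "boy girl child kid",
  "truck vehicle train motorcycle bus boat bike car",
  "window windshield",
  "building tower house",
  "shoe sneaker boot",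
  "bench chair seat",
  "tree trunk",
  "food pizza",
  "face head mouth",
  "fruit banana orange",
  "table desk counter stand",
  "cabinet shelf drawer",
  "coat jacket",
  "street track sidewalk",
  "airplane plane",
  "cap hat helmet",
  "hill mountain",
  "pole post",
  "pot vase",
  "jean pant short",
  "letter logo sign number",
  "laptop screen",
  "light lamp",
  "beach wave",
  "tire wheel",
  "paw hand"]

-- built once at module level: label -> index of its category
def word2cat : PySem.Dict String Int :=
  (PySem.List.enumerate CATEGORY_WORDS 0).foldl
    (fun d p => (PySem.Str.split₀ p.2).foldl (fun d w => d.insert w p.1) d)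
    PySem.Dict.empty

def is_same_category_py_alt (obj1 : String) (obj2 : String) : Bool :=
  let c1 := word2cat.get? obj1
  (c1.isSome && (c1 == word2cat.get? obj2)) || (obj1 == obj2)

-- ===== PRECONDITION & SPEC =====
def Spec_is_same_category_py (obj1 : String) (obj2 : String) (out : Bool) : Prop := out = is_same_category_py_alt obj1 obj2
instance (obj1 : String) (obj2 : String) (out : Bool) : Decidable (Spec_is_same_category_py obj1 obj2 out) := by unfold Spec_is_same_category_py; infer_instance

-- ===== CLAIM (what is proved, stated in full; the proofs are below) =====
def Claim_equal_is_same_category_py : Prop := ∀ (obj1 : String) (obj2 : String), Dom_is_same_category_py obj1 obj2 → Spec_is_same_category_py obj1 obj2 (is_same_category_py obj1 obj2)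

-- ===== LEMMAS AND PROOFS =====

-- A's fold keeps the LAST matching element: it is find? on the reversed list.
theorem foldl_lastMatch {α : Type} (p : α → Bool) :
    ∀ (l : List α) (init : Option α),
      l.foldl (fun m x => if p x then some x else m) init
        = match l.reverse.find? p with
          | some x => some x
          | none => init := by
  intro l
  induction l with
  | nil => intro init; simp
  | cons h t ih =>
    intro init
    simp only [List.foldl_cons, List.reverse_cons, List.find?_append, ih]
    cases hf : t.reverse.find? p with
    | some x => simp
    | none => cases hp : p h <;> simp [hp]

-- inner loop: inserting every word of a category with index i
theorem get?_inner (c : List String) (i : Int) :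
    ∀ (d : PySem.Dict String Int) (w : String),
      (c.foldl (fun d x => d.insert x i) d).get? w
        = if w ∈ c then some i else d.get? w := by
  induction c with
  | nil => intro d w; simp
  | cons h t ih =>
    intro d w
    simp only [List.foldl_cons, ih, List.mem_cons]
    by_cases hw : w ∈ t
    · simp [hw]
    · by_cases hwh : w = h
      · simp [hwh, PySem.Dict.get?_insert_self]
      · simp [hw, hwh, PySem.Dict.get?_insert_of_ne _ _ hwh]

-- outer loop: the final lookup is the index of the LAST category containing w
theorem get?_build :
    ∀ (l : List (Int × List String)) (d : PySem.Dict String Int) (w : String),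
      (l.foldl (fun d p => p.2.foldl (fun d x => d.insert x p.1) d) d).get? w
        = match l.reverse.find? (fun p => p.2.contains w) with
          | some p => some p.1
          | none => d.get? w := by
  intro l
  induction l with
  | nil => intro d w; simp
  | cons h t ih =>
    intro d w
    simp only [List.foldl_cons, List.reverse_cons, List.find?_append, ih]
    cases hf : t.reverse.find? (fun p => p.2.contains w) with
    | some x => simp
    | none =>
      by_cases hm : w ∈ h.2
      · simp [get?_inner, hm]
      · have hc : (h.2.contains w) = false := by
          simpa using fun h' => hm (List.contains_iff_mem.mp h')
        simp [get?_inner, hm]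

-- abbreviation used only by the proofs
def ECATS : List (Int × List String) := PySem.List.enumerate OBJ_DUP_CATEGORY 0

-- B's enumerated split strings ARE A's enumerated categories (checked by computation)
theorem enum_split_eq :
    (PySem.List.enumerate CATEGORY_WORDS 0).map
      (fun p => (p.1, PySem.Str.split₀ p.2)) = ECATS := by
  decide

theorem word2cat_eq_build :
    word2cat
      = ECATS.foldl (fun d p => p.2.foldl (fun d x => d.insert x p.1) d)
          PySem.Dict.empty := by
  rw [word2cat, ← enum_split_eq, List.foldl_map]

theorem get?_word2cat (w : String) :
    word2cat.get? w
      = match ECATS.reverse.find? (fun p => p.2.contains w) with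
        | some p => some p.1
        | none => none := by
  have := get?_build ECATS PySem.Dict.empty w
  rw [word2cat_eq_build]
  simpa using this

-- the categories are pairwise disjoint (checked by computation)
theorem cats_disjoint :
    ECATS.reverse.Pairwise (fun p q => p.2.all (fun w => !q.2.contains w) = true) := by
  decide

theorem cats_disjoint' :
    ∀ p ∈ ECATS.reverse, ∀ q ∈ ECATS.reverse, ∀ w : String,
      w ∈ p.2 → w ∈ q.2 → p = q := by
  have h : ECATS.reverse.Pairwise
      (fun p q : Int × List String => ∀ w : String, w ∈ p.2 → w ∈ q.2 → False) := by
    refine cats_disjoint.imp ?_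
    intro p q hall w hwp hwq
    have h' := (List.all_eq_true.mp hall) w hwp
    simp at h'
    exact h' hwq
  have hsym : Symmetric (fun p q : Int × List String => ∀ w : String, w ∈ p.2 → w ∈ q.2 → False) :=
    fun a b hab v h1 h2 => hab v h2 h1
  intro p hp q hq w hwp hwq
  by_contra hne
  exact h.forall hsym hp hq hne w hwp hwq

-- the indices are distinct (checked by computation)
theorem cats_nodup_fst : (ECATS.reverse.map Prod.fst).Nodup := by decide

theorem mem_cats_of_mem (c : List String) (hc : c ∈ OBJ_DUP_CATEGORY) :
    ∃ p ∈ ECATS.reverse, p.2 = c := by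
  have : c ∈ ECATS.map Prod.snd := by
    simpa [ECATS, PySem.List.map_snd_enumerate] using hc
  rcases List.mem_map.mp this with ⟨p, hp, hpc⟩
  exact ⟨p, List.mem_reverse.mpr hp, hpc⟩

-- the key bridge: A's "some category contains both" test equals B's two dict lookups
theorem bridge (obj1 obj2 : String) :
    (OBJ_DUP_CATEGORY.any fun c => c.contains obj1 && c.contains obj2)
      = ((word2cat.get? obj1).isSome && (word2cat.get? obj1 == word2cat.get? obj2)) := by
  cases hA : (OBJ_DUP_CATEGORY.any fun c => c.contains obj1 && c.contains obj2) with
  | true =>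
    rcases List.any_eq_true.mp hA with ⟨c, hc, hboth⟩
    have h1 : obj1 ∈ c := List.contains_iff_mem.mp (Bool.and_elim_left hboth)
    have h2 : obj2 ∈ c := List.contains_iff_mem.mp (Bool.and_elim_right hboth)
    rcases mem_cats_of_mem c hc with ⟨q, hq, hqc⟩
    have hfind : ∀ w : String, w ∈ c →
        ECATS.reverse.find? (fun p => p.2.contains w) = some q := by
      intro w hw
      have hex : ∃ x ∈ ECATS.reverse, (fun p : Int × List String => p.2.contains w) x := by
        exact ⟨q, hq, by simpa [hqc] using hw⟩
      rcases Option.isSome_iff_exists.mp (List.find?_isSome.mpr hex) with ⟨r, hr⟩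
      have hrmem : r ∈ ECATS.reverse := List.mem_of_find?_eq_some hr
      have hrw : w ∈ r.2 := by simpa using List.find?_some hr
      have : r = q := cats_disjoint' r hrmem q hq w hrw (hqc ▸ hw)
      rw [hr, this]
    rw [get?_word2cat, get?_word2cat, hfind obj1 h1, hfind obj2 h2]
    simp
  | false =>
    symm
    by_contra hB
    rcases Bool.and_eq_true_iff.mp (Bool.of_not_eq_false hB) with ⟨hsome, heq⟩
    rw [get?_word2cat] at hsome heq
    cases hf1 : ECATS.reverse.find? (fun p => p.2.contains obj1) with
    | none => rw [hf1] at hsome; simp at hsome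
    | some p1 =>
      rw [hf1] at heq
      rw [get?_word2cat] at heq
      cases hf2 : ECATS.reverse.find? (fun p => p.2.contains obj2) with
      | none => rw [hf2] at heq; simp at heq
      | some p2 =>
        rw [hf2] at heq
        have hidx : p1.1 = p2.1 := by simpa using heq
        have hp1 := List.mem_of_find?_eq_some hf1
        have hp2 := List.mem_of_find?_eq_some hf2
        have hpeq : p1 = p2 :=
          List.inj_on_of_nodup_map cats_nodup_fst hp1 hp2 hidx
        have h1 : obj1 ∈ p1.2 := by simpa using List.find?_some hf1
        have h2 : obj2 ∈ p1.2 := by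
          rw [hpeq]; simpa using List.find?_some hf2
        have hcm : p1.2 ∈ OBJ_DUP_CATEGORY := by
          have : p1 ∈ ECATS := List.mem_reverse.mp hp1
          have : p1.2 ∈ ECATS.map Prod.snd := List.mem_map.mpr ⟨p1, this, rfl⟩
          simpa [ECATS, PySem.List.map_snd_enumerate] using this
        have : (OBJ_DUP_CATEGORY.any fun c => c.contains obj1 && c.contains obj2) = true :=
          List.any_eq_true.mpr ⟨p1.2, hcm, by simpa using ⟨h1, h2⟩⟩
        rw [hA] at this; exact Bool.false_ne_true this

theorem memberA (obj1 obj2 : String) :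
    (OBJ_DUP_CATEGORY.foldl
      (fun m categ => if categ.contains obj1 && categ.contains obj2 then some categ else m)
      none).isSome
      = (OBJ_DUP_CATEGORY.any fun c => c.contains obj1 && c.contains obj2) := by
  rw [foldl_lastMatch]
  cases hf : OBJ_DUP_CATEGORY.reverse.find? (fun c => c.contains obj1 && c.contains obj2) with
  | some c =>
    have hpx := List.find?_some hf
    have hx := List.mem_of_find?_eq_some hf
    simp only [Option.isSome_some]
    symm
    exact List.any_eq_true.mpr ⟨c, List.mem_reverse.mp hx, hpx⟩
  | none =>
    simp only [Option.isSome_none]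
    symm
    rw [Bool.eq_false_iff]
    intro hany
    rcases List.any_eq_true.mp hany with ⟨x, hx, hpx⟩
    have h' := List.find?_eq_none.mp hf x (List.mem_reverse.mpr hx)
    simp at h' hpx
    exact h' hpx.1 hpx.2

-- ===== VERDICT (by name: the statement is the Claim_ definition above) =====
theorem is_same_category_py_spec : Claim_equal_is_same_category_py := by
  intro obj1 obj2 _
  unfold Spec_is_same_category_py
  show is_same_category_py obj1 obj2 = is_same_category_py_alt obj1 obj2
  unfold is_same_category_py is_same_category_py_alt
  simp only []
  rw [show ∀ b : Bool, (if b = true then true else false) = b from fun b => by cases b <;> simp]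
  rw [memberA, bridge]
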